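-- pv_equiv track=rewrite | github.com/3gatsunolion/leetcode | Problems 0800-0899/816. Ambiguous Coordinates/solution.py | getPossibleCoords
-- ===== SOURCE A (Python) =====
-- def getPossibleCoords(s):
--     # 0 -> 0
--     # 0XXXXX -> 0.XXXXX
--     # 0xxxx0 -> nothing
--     # XXXXX0 -> [XXXXX0]
--     # XXXXXX -> [XXXXXX, X.XXXXX, XX.XXXX, ...]
--     n = len(s)
--     if n == 0 or (n > 1 and s[0] == s[-1] == '0'): return []
--     if n == 1 or s[-1] == '0': return [s]
--     if n > 1 and s[0] == '0': return ['0.' + s[1:]]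
--     res = [s]
--     for i in range(1, n):
--         res.append(s[:i] + "." + s[i:])
--
--     return res
-- ===== SOURCE B (Python) =====
-- def getPossibleCoords(s):
--     if not s:
--         return []
--
--     def valid(intp, frac):
--         if intp != '0' and intp.startswith('0'):
--             return False
--         return frac is None or not frac.endswith('0')
--
--     out = []
--     for i in range(len(s)):
--         cand = s if i == 0 else s[:i] + '.' + s[i:]
--         ok = valid(s, None) if i == 0 else valid(s[:i], s[i:])
--         if ok:
--             out.append(cand)
--     return out
-- ===== Notes on version B (the rewrite author's own statement) =====
-- stated objective: simpler
-- what changed: Replaces A's four-way case ladder over first/last characters by one uniform loop over every decimal-point position filtered through a single validity predicate (integer part '0' or no leading '0', fractional part not ending in '0').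
import Mathlib
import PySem

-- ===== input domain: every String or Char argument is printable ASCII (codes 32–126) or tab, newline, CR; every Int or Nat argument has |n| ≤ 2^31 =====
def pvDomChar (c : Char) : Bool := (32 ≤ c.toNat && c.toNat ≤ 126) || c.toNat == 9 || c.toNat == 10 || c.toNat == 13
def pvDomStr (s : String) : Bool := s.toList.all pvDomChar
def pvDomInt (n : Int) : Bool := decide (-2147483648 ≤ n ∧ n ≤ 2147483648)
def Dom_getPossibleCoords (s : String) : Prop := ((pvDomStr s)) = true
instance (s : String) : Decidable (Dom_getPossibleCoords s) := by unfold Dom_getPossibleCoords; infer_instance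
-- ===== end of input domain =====

-- B replaces A's four-way case ladder by one uniform loop over every decimal-point
-- position filtered through a single validity predicate (objective: simpler).

-- ===== PORT A =====
def getPossibleCoords (s : String) : List String :=
  let n : Int := PySem.Str.len s
  if n = 0 ∨ (n > 1 ∧ PySem.Str.pyGet? s 0 = PySem.Str.pyGet? s (-1) ∧ PySem.Str.pyGet? s (-1) = some '0') then []
  else if n = 1 ∨ PySem.Str.pyGet? s (-1) = some '0' then [s]
  else if n > 1 ∧ PySem.Str.pyGet? s 0 = some '0' then ["0." ++ PySem.Str.slice s (some 1) none]
  else (PySem.List.pyRange 1 n 1).foldl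
    (fun res i => res ++ [PySem.Str.slice s none (some i) ++ "." ++ PySem.Str.slice s (some i) none]) [s]

-- ===== PORT B =====
-- `valid(intp, frac)` from Source B
def pvValid (intp : String) (frac : Option String) : Bool :=
  if intp ≠ "0" ∧ PySem.Str.startswith intp "0" then false
  else
    match frac with
    | none => true
    | some f => !PySem.Str.endswith f "0"

def getPossibleCoords_alt (s : String) : List String :=
  if PySem.Str.len s = 0 then []
  else
    (PySem.List.pyRange 0 (PySem.Str.len s) 1).foldl
      (fun out i =>
        let cand := if i = 0 then s else PySem.Str.slice s none (some i) ++ "." ++ PySem.Str.slice s (some i) none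
        let ok := if i = 0 then pvValid s none
                  else pvValid (PySem.Str.slice s none (some i)) (some (PySem.Str.slice s (some i) none))
        if ok then out ++ [cand] else out) []

-- ===== PRECONDITION & SPEC =====
def Spec_getPossibleCoords (s : String) (out : List String) : Prop := out = getPossibleCoords_alt s
instance (s : String) (out : List String) : Decidable (Spec_getPossibleCoords s out) := by unfold Spec_getPossibleCoords; infer_instance

-- ===== CLAIM (what is proved, stated in full; the proofs are below) =====
def Claim_equal_getPossibleCoords : Prop := ∀ (s : String), Dom_getPossibleCoords s → Spec_getPossibleCoords s (getPossibleCoords s)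

-- ===== LEMMAS AND PROOFS =====

-- B's loop body, abstracted: the validity test and the candidate at split position i
def pvP (s : String) (i : Int) : Bool :=
  if i = 0 then pvValid s none
  else pvValid (PySem.Str.slice s none (some i)) (some (PySem.Str.slice s (some i) none))

def pvF (s : String) (i : Int) : String :=
  if i = 0 then s else PySem.Str.slice s none (some i) ++ "." ++ PySem.Str.slice s (some i) none

theorem pv_alt_eq (s : String) (h : ¬ PySem.Str.len s = 0) :
    getPossibleCoords_alt s =
      ((PySem.List.pyRange 0 (PySem.Str.len s) 1).filter (pvP s)).map (pvF s) := by
  simp only [getPossibleCoords_alt, if_neg h]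
  exact (PySem.List.foldl_append_if (pvP s) (pvF s) _ []).trans (by simp)

theorem pv_toList_take (s : String) (i : Int) (h : 0 ≤ i) :
    (PySem.Str.slice s none (some i)).toList = s.toList.take i.toNat := by
  rw [PySem.Str.toList_slice, PySem.Chars.slice_eq_listSlice, PySem.List.slice_to _ h]

theorem pv_toList_drop (s : String) (i : Int) (h : 0 ≤ i) :
    (PySem.Str.slice s (some i) none).toList = s.toList.drop i.toNat := by
  rw [PySem.Str.toList_slice, PySem.Chars.slice_eq_listSlice, PySem.List.slice_from _ h]

theorem pv_startswith0 (u : String) :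
    PySem.Str.startswith u "0" = true ↔ ['0'] <+: u.toList := by
  have h0 : ("0" : String).toList = ['0'] := by decide
  rw [PySem.Str.startswith_eq, h0, PySem.Chars.startswith_iff]

theorem pv_endswith0 (u : String) :
    PySem.Str.endswith u "0" = true ↔ ['0'] <:+ u.toList := by
  have h0 : ("0" : String).toList = ['0'] := by decide
  rw [PySem.Str.endswith_eq, h0, PySem.Chars.endswith_iff]

theorem pv_ne_zero_str (u : String) : u ≠ "0" ↔ u.toList ≠ ['0'] := by
  have h0 : ("0" : String).toList = ['0'] := by decide
  constructor
  · intro h hc; exact h (String.toList_inj.mp (hc.trans h0.symm))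
  · intro h hc; exact h (by rw [hc, h0])

theorem pv_suffix_singleton_iff (x : Char) (ys : List Char) :
    [x] <:+ ys ↔ ys.getLast? = some x := by
  constructor
  · rintro ⟨zs, rfl⟩; simp
  · intro hg
    induction ys using List.reverseRecOn with
    | nil => simp at hg
    | append_singleton zs z _ => simp at hg; subst hg; exact ⟨zs, rfl⟩

theorem pv_prefix_singleton_iff (d c : Char) (xs : List Char) :
    [d] <+: c :: xs ↔ c = d := by
  simp [List.cons_prefix_cons, eq_comm]

-- p at a positive split position when the whole string ends in '0': the fraction ends in '0'

theorem pv_p_pos_last0 (s : String) (i : Int) (h1 : 1 ≤ i)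
    (h2 : i < (s.toList.length : Int)) (hd : s.toList.getLast? = some '0') :
    pvP s i = false := by
  have hk : i.toNat < s.toList.length := by omega
  rw [pvP, if_neg (by omega : ¬ i = 0), pvValid]
  have he : PySem.Str.endswith (PySem.Str.slice s (some i) none) "0" = true := by
    rw [pv_endswith0, pv_toList_drop s i (by omega), pv_suffix_singleton_iff,
      List.getLast?_drop, if_neg (by omega)]
    exact hd
  split_ifs
  · rfl
  · simp only [he, Bool.not_true]

-- p at a positive split position, head ≠ '0', last ≠ '0': valid

theorem pv_p_pos_ok (s : String) (c : Char) (t : List Char) (hl : s.toList = c :: t)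
    (hc : c ≠ '0') (hd : s.toList.getLast? ≠ some '0') (i : Int) (h1 : 1 ≤ i)
    (h2 : i < (s.toList.length : Int)) :
    pvP s i = true := by
  rw [pvP, if_neg (by omega : ¬ i = 0), pvValid]
  have hsw : ¬ PySem.Str.startswith (PySem.Str.slice s none (some i)) "0" = true := by
    rw [pv_startswith0, pv_toList_take s i (by omega), hl,
      List.take_cons (by omega : 0 < i.toNat), pv_prefix_singleton_iff]
    exact hc
  rw [if_neg (by tauto)]
  have he : ¬ PySem.Str.endswith (PySem.Str.slice s (some i) none) "0" = true := by
    rw [pv_endswith0, pv_toList_drop s i (by omega), pv_suffix_singleton_iff,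
      List.getLast?_drop, if_neg (by omega)]
    exact hd
  simp only [Bool.not_eq_true] at he
  simp only [he, Bool.not_false]

-- p at split position 1 when the string starts with '0' and does not end in '0': "0.rest" is valid

theorem pv_p_one_head0 (s : String) (t : List Char) (hl : s.toList = '0' :: t)
    (hd : s.toList.getLast? ≠ some '0') (h2 : (1 : Int) < (s.toList.length : Int)) :
    pvP s 1 = true := by
  rw [pvP, if_neg (by omega : ¬ (1:Int) = 0), pvValid]
  have ht : (PySem.Str.slice s none (some 1)).toList = ['0'] := by
    rw [pv_toList_take s 1 (by omega), hl]; rfl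
  have hne : ¬ (PySem.Str.slice s none (some 1) ≠ "0") := by
    simp only [ne_eq, not_not]
    exact String.toList_inj.mp (by rw [ht]; decide)
  rw [if_neg (by tauto)]
  have he : ¬ PySem.Str.endswith (PySem.Str.slice s (some 1) none) "0" = true := by
    rw [pv_endswith0, pv_toList_drop s 1 (by omega), pv_suffix_singleton_iff,
      List.getLast?_drop, if_neg (by omega)]
    exact hd
  simp only [Bool.not_eq_true] at he
  simp only [he, Bool.not_false]

-- p at split position ≥ 2 when the string starts with '0': integer part has a leading zero

theorem pv_p_ge2_head0 (s : String) (t : List Char) (hl : s.toList = '0' :: t)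
    (i : Int) (h1 : 2 ≤ i) (h2 : i < (s.toList.length : Int)) :
    pvP s i = false := by
  rw [pvP, if_neg (by omega : ¬ i = 0), pvValid]
  have hto : (PySem.Str.slice s none (some i)).toList = '0' :: t.take (i.toNat - 1) := by
    rw [pv_toList_take s i (by omega), hl, List.take_cons (by omega : 0 < i.toNat)]
  have hlen : i < (t.length : Int) + 1 := by rw [hl] at h2; simpa using h2
  have htl : t.take (i.toNat - 1) ≠ [] := by
    simp only [ne_eq, List.take_eq_nil_iff]
    rintro (h | rfl)
    · omega
    · simp at hlen; omega
  rw [if_pos]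
  constructor
  · rw [pv_ne_zero_str, hto]
    intro hc
    exact htl (by injection hc)
  · rw [pv_startswith0, hto, pv_prefix_singleton_iff]

-- p at position 0 (the whole number): valid iff the string is "0" or has no leading '0'

theorem pv_p_zero_head_ne (s : String) (c : Char) (t : List Char) (hl : s.toList = c :: t)
    (hc : c ≠ '0') : pvP s 0 = true := by
  rw [pvP, if_pos rfl, pvValid, if_neg]
  rintro ⟨-, hsw⟩
  rw [pv_startswith0, hl, pv_prefix_singleton_iff] at hsw
  exact hc hsw

theorem pv_p_zero_is0 (s : String) (hl : s.toList = ['0']) : pvP s 0 = true := by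
  have : s = "0" := String.toList_inj.mp (by rw [hl]; decide)
  subst this
  decide

theorem pv_p_zero_false (s : String) (t : List Char) (hl : s.toList = '0' :: t)
    (ht : t ≠ []) : pvP s 0 = false := by
  rw [pvP, if_pos rfl, pvValid, if_pos]
  constructor
  · rw [pv_ne_zero_str, hl]
    intro hc
    exact ht (by injection hc)
  · rw [pv_startswith0, hl, pv_prefix_singleton_iff]

theorem pv_pyGet_neg_one {α : Type} (l : List α) (h : l ≠ []) :
    PySem.List.pyGet? l (-1) = l.getLast? := by
  have hl : 0 < l.length := List.length_pos_iff.mpr h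
  simp only [PySem.List.pyGet?, PySem.List.pyIdx?]
  norm_num
  rw [if_pos (by exact_mod_cast hl), List.getLast?_eq_getElem?]
  simp

theorem pv_main (s : String) : getPossibleCoords s = getPossibleCoords_alt s := by
  rcases hl : s.toList with - | ⟨c, t⟩
  · -- empty string
    have h0 : PySem.Str.len s = 0 := by rw [PySem.Str.len_eq, hl]; rfl
    simp only [getPossibleCoords, getPossibleCoords_alt]
    rw [if_pos (Or.inl h0), if_pos h0]
  · have hlen : PySem.Str.len s = ((t.length + 1 : Nat) : Int) := by
      rw [PySem.Str.len_eq, hl]; simp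
    have hne : ¬ PySem.Str.len s = 0 := by rw [hlen]; omega
    have hget0 : PySem.Str.pyGet? s 0 = some c := by simp [hl]
    have hgetm1 : PySem.Str.pyGet? s (-1) = (c :: t).getLast? := by
      rw [PySem.Str.pyGet?_eq, PySem.Chars.pyGet?_eq_listPyGet?, hl,
        pv_pyGet_neg_one _ (by simp)]
    have hlength : ((s.toList.length : Int)) = (t.length : Int) + 1 := by rw [hl]; simp
    rw [pv_alt_eq s hne]
    simp only [getPossibleCoords]
    rw [hlen, hget0, hgetm1]
    rw [PySem.List.pyRange_one_cons (by positivity : (0:Int) < ((t.length + 1 : Nat) : Int))]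
    simp only [zero_add]
    cases t with
    | nil =>
      -- single character
      rw [if_neg (by norm_num), if_pos (Or.inl (by norm_num))]
      rw [PySem.List.pyRange_one_eq_nil (by norm_num)]
      have hp0 : pvP s 0 = true := by
        by_cases hc : c = '0'
        · exact pv_p_zero_is0 s (by rw [hl, hc])
        · exact pv_p_zero_head_ne s c [] hl hc
      simp [hp0, pvF]
    | cons c2 t2 =>
      have hNgt1 : (1 : Int) < ((c2 :: t2).length + 1 : Nat) := by simp only [List.length_cons]; push_cast; omega
      by_cases hd : (c :: c2 :: t2).getLast? = some '0'
      · by_cases hc : c = '0'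
        · -- both first and last are '0': A = [], B = []
          rw [if_pos (Or.inr ⟨by push_cast; omega, by rw [hd, hc], hd⟩)]
          rw [List.filter_eq_nil_iff.mpr ?_, List.map_nil]
          intro i hi
          rw [List.mem_cons] at hi
          rcases hi with rfl | hi
          · simp [pv_p_zero_false s (c2 :: t2) (by rw [hl, hc]) (by simp)]
          · rw [PySem.List.mem_pyRange_one] at hi
            simp [pv_p_pos_last0 s i hi.1 (by rw [hlength]; push_cast at hi ⊢; omega)
              (by rw [hl]; exact hd)]
        · -- last is '0', first is not: A = [s], B = [s]
          rw [if_neg (by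
            rintro (h | ⟨-, h1, h2⟩)
            · push_cast at h; omega
            · rw [h2] at h1; exact hc (by injection h1))]
          rw [if_pos (Or.inr hd)]
          have htail : List.filter (pvP s) (PySem.List.pyRange 1 ((c2 :: t2).length + 1 : Nat) 1) = [] := by
            rw [List.filter_eq_nil_iff]
            intro i hi
            rw [PySem.List.mem_pyRange_one] at hi
            simp [pv_p_pos_last0 s i hi.1 (by rw [hlength]; push_cast at hi ⊢; omega)
              (by rw [hl]; exact hd)]
          rw [List.filter_cons_of_pos (pv_p_zero_head_ne s c (c2 :: t2) hl hc), htail]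
          simp [pvF]
      · by_cases hc : c = '0'
        · -- starts with '0', does not end in '0': A = ["0." + s[1:]], B likewise
          rw [if_neg (by
            rintro (h | ⟨-, -, h2⟩)
            · push_cast at h; omega
            · exact hd h2)]
          rw [if_neg (by
            rintro (h | h)
            · push_cast at h; omega
            · exact hd h)]
          rw [if_pos ⟨by push_cast; omega, by rw [hc]⟩]
          rw [PySem.List.pyRange_one_cons (by push_cast; omega)]
          have h0f : pvP s 0 = false := pv_p_zero_false s (c2 :: t2) (by rw [hl, hc]) (by simp)
          have h1t : pvP s 1 = true :=
            pv_p_one_head0 s (c2 :: t2) (by rw [hl, hc]) (by rw [hl]; exact hd)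
              (by rw [hlength]; omega)
          have htail : List.filter (pvP s) (PySem.List.pyRange (1 + 1) ((c2 :: t2).length + 1 : Nat) 1) = [] := by
            rw [List.filter_eq_nil_iff]
            intro i hi
            rw [PySem.List.mem_pyRange_one] at hi
            simp [pv_p_ge2_head0 s (c2 :: t2) (by rw [hl, hc]) i (by omega)
              (by rw [hlength]; push_cast at hi ⊢; omega)]
          rw [List.filter_cons_of_neg (by simp [h0f]), List.filter_cons_of_pos h1t, htail]
          simp only [List.map_cons, List.map_nil]
          congr 1
          -- "0." ++ s[1:] = s[:1] ++ "." ++ s[1:]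
          apply String.toList_inj.mp
          have e1 : ("0." : String).toList = ['0', '.'] := by decide
          have e2 : ("." : String).toList = ['.'] := by decide
          simp only [String.toList_append, pv_toList_take s 1 (by omega), pvF,
            if_neg (by omega : ¬ (1:Int) = 0), pv_toList_drop s 1 (by omega), hl, hc, e1, e2]
          simp
        · -- no leading or trailing '0': every split is valid
          rw [if_neg (by
            rintro (h | ⟨-, -, h2⟩)
            · push_cast at h; omega
            · exact hd h2)]
          rw [if_neg (by
            rintro (h | h)
            · push_cast at h; omega
            · exact hd h)]
          rw [if_neg (by rintro ⟨-, h⟩; exact hc (by injection h))]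
          rw [PySem.List.foldl_append_singleton_eq_map]
          have hfull : List.filter (pvP s) (0 :: PySem.List.pyRange 1 ((c2 :: t2).length + 1 : Nat) 1) =
              0 :: PySem.List.pyRange 1 ((c2 :: t2).length + 1 : Nat) 1 := by
            rw [List.filter_eq_self]
            intro i hi
            rw [List.mem_cons] at hi
            rcases hi with rfl | hi
            · exact pv_p_zero_head_ne s c (c2 :: t2) hl hc
            · rw [PySem.List.mem_pyRange_one] at hi
              exact pv_p_pos_ok s c (c2 :: t2) hl hc (by rw [hl]; exact hd) i hi.1
                (by rw [hlength]; push_cast at hi ⊢; omega)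
          rw [hfull]
          simp only [List.map_cons]
          rw [pvF, if_pos rfl]
          simp only [List.singleton_append]
          congr 1
          apply List.map_congr_left
          intro i hi
          rw [PySem.List.mem_pyRange_one] at hi
          rw [pvF, if_neg (by omega)]

-- ===== VERDICT (by name: the statement is the Claim_ definition above) =====
theorem getPossibleCoords_spec : Claim_equal_getPossibleCoords := by
  intro s _
  unfold Spec_getPossibleCoords
  exact pv_main s
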